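-- pv_equiv track=rewrite | github.com/can-gurkan/gridarians | utils.py | check_robot_configuration
-- ===== SOURCE A (Python) =====
-- def check_robot_configuration(configuration):
--     # Check that all parts are connected
--     """
--     Check that a robot configuration is valid according to the specified rules.
--
--     Args:
--         configuration: List of tuples representing robot parts [x, y, type, direction]
--
--     Returns:
--         bool: True if configuration is valid, False otherwise
--     """
--     if not configuration:
--         return False
--
--     # Check that all tuples consist of four integers
--     for part in configuration:
--         if not isinstance(part, (list, tuple)) or len(part) != 4:
--             return False
--         if not all(isinstance(x, int) for x in part):
--             return False
--
--     # Check that the first tuple's third element is a 1 (seed component)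
--     if configuration[0][2] != 1:
--         return False
--
--     # Check that none of the other tuple's third element is a 1, but are either 2, 3, 4, or 6
--     for part in configuration[1:]:
--         part_type = part[2]
--         if part_type == 1 or part_type not in [2, 3, 4, 6]:
--             return False
--
--     # Check direction constraints
--     for part in configuration:
--         part_type = part[2]
--         direction = part[3]
--         # For propulsion (2) and sensor (4) components, direction must be 0, 1, 2, or 3
--         if part_type in [2, 4] and direction not in [0, 1, 2, 3]:
--             return False
--         # For rotator (3) components, direction must be 0 or 1
--         if part_type == 3 and direction not in [0, 1]:
--             return False
--
--     # Check that all parts are connected without diagonal connections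
--     positions = set((part[0], part[1]) for part in configuration)
--
--     # Build adjacency graph
--     adjacency = {pos: [] for pos in positions}
--     for pos in positions:
--         x, y = pos
--         # Check four adjacent positions (no diagonals)
--         for dx, dy in [(0, 1), (0, -1), (1, 0), (-1, 0)]:
--             neighbor = (x + dx, y + dy)
--             if neighbor in positions:
--                 adjacency[pos].append(neighbor)
--
--     # Check connectivity using BFS from the first position
--     start_pos = (configuration[0][0], configuration[0][1])
--     visited = set()
--     queue = [start_pos]
--     visited.add(start_pos)
--
--     while queue:
--         current = queue.pop(0)
--         for neighbor in adjacency[current]: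
--             if neighbor not in visited:
--                 visited.add(neighbor)
--                 queue.append(neighbor)
--
--     # All positions should be reachable from the start position
--     return len(visited) == len(positions)
-- ===== SOURCE B (Python) =====
-- def check_robot_configuration(configuration):
--     """Same validation as a single-pass predicate, then quick-find union-find
--     (label relabelling) instead of BFS for the connectivity check."""
--     def part_ok(part, is_seed):
--         if not isinstance(part, (list, tuple)) or len(part) != 4:
--             return False
--         if not all(isinstance(v, int) for v in part):
--             return False
--         t, d = part[2], part[3]
--         if is_seed:
--             if t != 1:
--                 return False
--         elif t not in (2, 3, 4, 6):
--             return False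
--         if t in (2, 4):
--             return d in (0, 1, 2, 3)
--         if t == 3:
--             return d in (0, 1)
--         return True
--
--     if not configuration:
--         return False
--     head, tail = configuration[0], configuration[1:]
--     if not (part_ok(head, True) and all(part_ok(p, False) for p in tail)):
--         return False
--
--     positions = set((p[0], p[1]) for p in configuration)
--     # quick-find: label[p] is the representative of p's component
--     label = {p: p for p in positions}
--     for (x, y) in positions:
--         for nb in ((x, y + 1), (x, y - 1), (x + 1, y), (x - 1, y)):
--             if nb in positions and label[nb] != label[(x, y)]:
--                 old, new = label[nb], label[(x, y)]
--                 label = {q: (new if v == old else v) for q, v in label.items()}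
--     root = label[(configuration[0][0], configuration[0][1])]
--     return all(v == root for v in label.values())
-- ===== Notes on version B (the rewrite author's own statement) =====
-- stated objective: alternative
-- what changed: Validation is collapsed into one single-pass per-part predicate, and the connectivity check replaces adjacency-dict + BFS with a queue by quick-find union-find: every position starts as its own label, adjacent positions' label classes are merged by relabelling, and the result is True iff every position carries the start position's label.
import Mathlib
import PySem

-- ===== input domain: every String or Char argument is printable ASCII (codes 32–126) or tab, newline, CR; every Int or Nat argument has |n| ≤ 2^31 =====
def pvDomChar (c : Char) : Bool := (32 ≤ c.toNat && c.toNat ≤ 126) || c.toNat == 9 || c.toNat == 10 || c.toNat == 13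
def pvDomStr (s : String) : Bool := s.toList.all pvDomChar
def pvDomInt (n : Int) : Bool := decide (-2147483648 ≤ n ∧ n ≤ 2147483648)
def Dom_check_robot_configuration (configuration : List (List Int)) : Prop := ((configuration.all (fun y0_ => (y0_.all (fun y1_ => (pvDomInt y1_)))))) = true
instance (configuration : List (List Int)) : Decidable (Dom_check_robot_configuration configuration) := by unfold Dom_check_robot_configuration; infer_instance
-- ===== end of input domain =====

-- B replaces the sequential validation loops by one per-part predicate and the
-- adjacency-dict + BFS connectivity check by quick-find union-find (labels merged by
-- relabelling; True iff all positions carry the start's label); return values are equal.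

-- ===== PORT A =====
-- (isinstance checks of A are identically true on List (List Int) and are dropped;
--  part[i] is read with getD, exact because it is only read after the length-4 check)
def pvA_offsets : List (Int × Int) := [(0,1),(0,-1),(1,0),(-1,0)]

def pvA_checkParts : List (List Int) → Bool
  | [] => true
  | part :: rest => if part.length == 4 then pvA_checkParts rest else false

def pvA_checkTypes : List (List Int) → Bool
  | [] => true
  | part :: rest =>
    if part.getD 2 0 == 1 || !([2,3,4,6].contains (part.getD 2 0)) then false
    else pvA_checkTypes rest

def pvA_checkDirs : List (List Int) → Bool
  | [] => true
  | part :: rest =>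
    if [2,4].contains (part.getD 2 0) && !([0,1,2,3].contains (part.getD 3 0)) then false
    else if part.getD 2 0 == 3 && !([0,1].contains (part.getD 3 0)) then false
    else pvA_checkDirs rest

def pvA_nbrStep (P : PySem.Set (Int × Int)) (d : PySem.Dict (Int × Int) (List (Int × Int)))
    (pos : Int × Int) : PySem.Dict (Int × Int) (List (Int × Int)) :=
  pvA_offsets.foldl (fun d2 o =>
    if PySem.Set.contains P (pos.1 + o.1, pos.2 + o.2) then
      d2.modify pos [] (· ++ [(pos.1 + o.1, pos.2 + o.2)])
    else d2) d

def pvA_bfs (adj : PySem.Dict (Int × Int) (List (Int × Int))) :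
    Nat → PySem.Set (Int × Int) → List (Int × Int) → PySem.Set (Int × Int)
  | 0, visited, _ => visited
  | _ + 1, visited, [] => visited
  | fuel + 1, visited, current :: rest =>
    let st := (adj.getD current []).foldl
      (fun (st : PySem.Set (Int × Int) × List (Int × Int)) nb =>
        if PySem.Set.contains st.1 nb then st
        else (PySem.Set.add st.1 nb, st.2 ++ [nb]))
      (visited, rest)
    pvA_bfs adj fuel st.1 st.2

def check_robot_configuration (configuration : List (List Int)) : Bool :=
  match configuration with
  | [] => false
  | c0 :: rest =>
    if !pvA_checkParts (c0 :: rest) then false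
    else if !(c0.getD 2 0 == 1) then false
    else if !pvA_checkTypes rest then false
    else if !pvA_checkDirs (c0 :: rest) then false
    else
      let positions : PySem.Set (Int × Int) :=
        PySem.Set.ofList ((c0 :: rest).map (fun part => (part.getD 0 0, part.getD 1 0)))
      let adjacency := positions.foldl (pvA_nbrStep positions)
        (positions.foldl (fun d pos => d.insert pos ([] : List (Int × Int))) PySem.Dict.empty)
      let start : Int × Int := (c0.getD 0 0, c0.getD 1 0)
      let visited := pvA_bfs adjacency positions.length (PySem.Set.add PySem.Set.empty start) [start]
      PySem.Set.len visited == PySem.Set.len positions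

-- ===== PORT B =====
def pvB_partOk (part : List Int) (isSeed : Bool) : Bool :=
  part.length == 4 &&
  (if isSeed then part.getD 2 0 == 1 else [2,3,4,6].contains (part.getD 2 0)) &&
  (if [2,4].contains (part.getD 2 0) then [0,1,2,3].contains (part.getD 3 0)
   else if part.getD 2 0 == 3 then [0,1].contains (part.getD 3 0)
   else true)

-- label[nb] / label[pos] are read with getD (default = the key itself), exact because
-- every read key is in positions = the dict's key set
def pvB_step (P : PySem.Set (Int × Int)) (L : PySem.Dict (Int × Int) (Int × Int))
    (pos : Int × Int) : PySem.Dict (Int × Int) (Int × Int) :=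
  [(pos.1, pos.2 + 1), (pos.1, pos.2 - 1), (pos.1 + 1, pos.2), (pos.1 - 1, pos.2)].foldl
    (fun L nb =>
      if PySem.Set.contains P nb && !(L.getD nb nb == L.getD pos pos) then
        PySem.Dict.ofList (L.items.map (fun qv =>
          (qv.1, if qv.2 == L.getD nb nb then L.getD pos pos else qv.2)))
      else L) L

def check_robot_configuration_alt (configuration : List (List Int)) : Bool :=
  match configuration with
  | [] => false
  | c0 :: rest =>
    if pvB_partOk c0 true && rest.all (fun p => pvB_partOk p false) then
      let P : PySem.Set (Int × Int) :=
        PySem.Set.ofList ((c0 :: rest).map (fun part => (part.getD 0 0, part.getD 1 0)))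
      let L := P.foldl (pvB_step P) (P.foldl (fun d p => d.insert p p) PySem.Dict.empty)
      let start : Int × Int := (c0.getD 0 0, c0.getD 1 0)
      L.values.all (fun v => v == L.getD start start)
    else false

-- ===== PRECONDITION & SPEC =====
def Spec_check_robot_configuration (configuration : List (List Int)) (out : Bool) : Prop := out = check_robot_configuration_alt configuration
instance (configuration : List (List Int)) (out : Bool) : Decidable (Spec_check_robot_configuration configuration out) := by unfold Spec_check_robot_configuration; infer_instance

-- ===== CLAIM (what is proved, stated in full; the proofs are below) =====
def Claim_equal_check_robot_configuration : Prop := ∀ (configuration : List (List Int)), Dom_check_robot_configuration configuration → Spec_check_robot_configuration configuration (check_robot_configuration configuration)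

-- ===== LEMMAS AND PROOFS =====

-- ---- shared abstractions: the grid graph on a set of positions ----
def pvNbrs (p : Int × Int) : List (Int × Int) :=
  [(p.1, p.2 + 1), (p.1, p.2 - 1), (p.1 + 1, p.2), (p.1 - 1, p.2)]

def pvE (P : List (Int × Int)) (p q : Int × Int) : Prop := p ∈ P ∧ q ∈ P ∧ q ∈ pvNbrs p

def pvReach (P : List (Int × Int)) : (Int × Int) → (Int × Int) → Prop :=
  Relation.ReflTransGen (pvE P)

lemma pvE_symm (P : List (Int × Int)) : Symmetric (pvE P) := by
  rintro p q ⟨hp, hq, hn⟩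
  refine ⟨hq, hp, ?_⟩
  simp only [pvNbrs, List.mem_cons, List.not_mem_nil, or_false] at hn ⊢
  rcases hn with h | h | h | h <;> subst h <;> simp [Prod.ext_iff]

lemma pvReach_symm (P : List (Int × Int)) : Symmetric (pvReach P) :=
  Relation.ReflTransGen.symmetric (pvE_symm P)

lemma pvLenLe {l l' : List (Int × Int)} (h : l.Nodup) (hs : l ⊆ l') : l.length ≤ l'.length := by
  calc l.length = l.toFinset.card := (List.toFinset_card_of_nodup h).symm
    _ ≤ l'.toFinset.card := Finset.card_le_card (fun x hx => by
        simp only [List.mem_toFinset] at *; exact hs hx)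
    _ ≤ l'.length := l'.toFinset_card_le

-- ---- validation equivalence ----
lemma pvA_checkParts_eq (l : List (List Int)) :
    pvA_checkParts l = l.all (fun part => part.length == 4) := by
  induction l with
  | nil => rfl
  | cons p t ih =>
    cases h : (p.length == 4) <;>
      · simp only [pvA_checkParts, List.all_cons]
        rw [h]
        simp [ih]

lemma pvA_checkTypes_eq (l : List (List Int)) :
    pvA_checkTypes l =
      l.all (fun part => !(part.getD 2 0 == 1 || !([2,3,4,6].contains (part.getD 2 0)))) := by
  induction l with
  | nil => rfl
  | cons p t ih =>
    cases h : (p.getD 2 0 == 1 || !([2,3,4,6].contains (p.getD 2 0))) <;>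
      · simp only [pvA_checkTypes, List.all_cons]
        rw [h]
        simp [ih]

lemma pvA_checkDirs_eq (l : List (List Int)) :
    pvA_checkDirs l =
      l.all (fun part =>
        !([2,4].contains (part.getD 2 0) && !([0,1,2,3].contains (part.getD 3 0))) &&
        !((part.getD 2 0 == 3) && !([0,1].contains (part.getD 3 0)))) := by
  induction l with
  | nil => rfl
  | cons p t ih =>
    cases h1 : ([2,4].contains (p.getD 2 0) && !([0,1,2,3].contains (p.getD 3 0))) <;>
      cases h2 : ((p.getD 2 0 == 3) && !([0,1].contains (p.getD 3 0))) <;>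
        · simp only [pvA_checkDirs, List.all_cons]
          rw [h1, h2]
          simp [ih]

lemma pvAll_and (l : List (List Int)) (p q : List Int → Bool) :
    (l.all fun x => p x && q x) = (l.all p && l.all q) := by
  induction l with
  | nil => rfl
  | cons x t ih =>
    cases hp : p x <;> cases hq : q x <;>
      simp only [List.all_cons, hp, hq, ih, Bool.true_and, Bool.false_and,
        Bool.and_false, Bool.and_assoc, Bool.and_left_comm]

lemma pvDir_eq (part : List Int) :
    (if [2,4].contains (part.getD 2 0) then [0,1,2,3].contains (part.getD 3 0)
     else if part.getD 2 0 == 3 then [0,1].contains (part.getD 3 0) else true) =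
    (!([2,4].contains (part.getD 2 0) && !([0,1,2,3].contains (part.getD 3 0))) &&
     !((part.getD 2 0 == 3) && !([0,1].contains (part.getD 3 0)))) := by
  cases h1 : [2,4].contains (part.getD 2 0) <;> cases h2 : (part.getD 2 0 == 3) <;>
    simp [h1, h2]
  · exfalso
    simp only [List.contains_eq_mem, List.mem_cons, List.not_mem_nil, or_false,
      decide_eq_true_eq, beq_iff_eq] at h1 h2
    omega

lemma pvType_eq (part : List Int) :
    ([2,3,4,6].contains (part.getD 2 0)) =
    (!(part.getD 2 0 == 1 || !([2,3,4,6].contains (part.getD 2 0)))) := by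
  cases h1 : [2,3,4,6].contains (part.getD 2 0) <;> cases h2 : (part.getD 2 0 == 1) <;>
    simp [h1, h2]
  exfalso
  simp only [List.contains_eq_mem, List.mem_cons, List.not_mem_nil, or_false,
    decide_eq_true_eq, beq_iff_eq] at h1 h2
  omega

lemma pvAC (A B C D E F : Bool) :
    (((A && B) && C && D) && (E && F)) = ((A && C && E) && ((B && D) && F)) := by
  cases A <;> cases B <;> cases C <;> cases D <;> cases E <;> cases F <;> rfl

lemma pvGuard_eq (c0 : List Int) (rest : List (List Int)) :
    (pvA_checkParts (c0 :: rest) && (c0.getD 2 0 == 1) &&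
      pvA_checkTypes rest && pvA_checkDirs (c0 :: rest)) =
    (pvB_partOk c0 true && rest.all (fun p => pvB_partOk p false)) := by
  simp only [pvA_checkParts_eq, pvA_checkTypes_eq, pvA_checkDirs_eq, List.all_cons]
  simp only [← pvType_eq, ← pvDir_eq]
  simp only [pvB_partOk, if_true, Bool.false_eq_true, if_false, pvAll_and]
  exact pvAC _ _ _ _ _ _

-- ---- A side: adjacency dict characterisation ----
def pvAdjA (P : PySem.Set (Int × Int)) (p : Int × Int) : List (Int × Int) :=
  List.map (fun o => (p.1 + o.1, p.2 + o.2))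
    (pvA_offsets.filter (fun o => PySem.Set.contains P (p.1 + o.1, p.2 + o.2)))

def pvD0 (P : PySem.Set (Int × Int)) : PySem.Dict (Int × Int) (List (Int × Int)) :=
  P.foldl (fun d pos => d.insert pos ([] : List (Int × Int))) PySem.Dict.empty

def pvAdjDict (P : PySem.Set (Int × Int)) : PySem.Dict (Int × Int) (List (Int × Int)) :=
  P.foldl (pvA_nbrStep P) (pvD0 P)

lemma pvMem_pvAdjA (P : PySem.Set (Int × Int)) (p nb : Int × Int) :
    nb ∈ pvAdjA P p ↔ (nb ∈ P ∧ nb ∈ pvNbrs p) := by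
  constructor
  · rintro h
    simp only [pvAdjA, List.mem_map, List.mem_filter] at h
    obtain ⟨o, ⟨ho, hc⟩, rfl⟩ := h
    have hmem : (p.1 + o.1, p.2 + o.2) ∈ P := by
      simpa [PySem.Set.contains, List.contains_iff_mem] using hc
    refine ⟨hmem, ?_⟩
    simp only [pvA_offsets, List.mem_cons, List.not_mem_nil, or_false] at ho
    rcases ho with rfl | rfl | rfl | rfl <;> simp [pvNbrs, Prod.ext_iff] <;> omega
  · rintro ⟨hP, hn⟩
    simp only [pvAdjA, List.mem_map, List.mem_filter]
    simp only [pvNbrs, List.mem_cons, List.not_mem_nil, or_false] at hn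
    rcases hn with h | h | h | h
    · exact ⟨(0, 1), ⟨by simp [pvA_offsets],
        by simp only [PySem.Set.contains, List.contains_iff_mem]; simpa [h] using hP⟩,
        by simp [h, Prod.ext_iff]⟩
    · exact ⟨(0, -1), ⟨by simp [pvA_offsets],
        by simp only [PySem.Set.contains, List.contains_iff_mem]
           simpa [h, sub_eq_add_neg] using hP⟩,
        by simp [h, Prod.ext_iff, sub_eq_add_neg]⟩
    · exact ⟨(1, 0), ⟨by simp [pvA_offsets],
        by simp only [PySem.Set.contains, List.contains_iff_mem]; simpa [h] using hP⟩,
        by simp [h, Prod.ext_iff]⟩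
    · exact ⟨(-1, 0), ⟨by simp [pvA_offsets],
        by simp only [PySem.Set.contains, List.contains_iff_mem]
           simpa [h, sub_eq_add_neg] using hP⟩,
        by simp [h, Prod.ext_iff, sub_eq_add_neg]⟩

lemma pvD0_getD (P : PySem.Set (Int × Int)) (p : Int × Int) :
    (pvD0 P).getD p [] = [] := by
  have aux : ∀ (l : List (Int × Int)) (d : PySem.Dict (Int × Int) (List (Int × Int))),
      (∀ q, d.getD q [] = []) →
      ∀ q, (l.foldl (fun d pos => d.insert pos ([] : List (Int × Int))) d).getD q [] = [] := by
    intro l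
    induction l with
    | nil => intro d h q; exact h q
    | cons x t ih =>
      intro d h q
      refine ih _ (fun q' => ?_) q
      by_cases hq : q' = x
      · subst hq; simp [PySem.Dict.getD_insert_self]
      · simp [PySem.Dict.getD_insert, hq, h q']
  exact aux P PySem.Dict.empty (fun q => by simp [PySem.Dict.getD_empty]) p

lemma pvNbrStep_getD (P : PySem.Set (Int × Int)) (d : PySem.Dict (Int × Int) (List (Int × Int)))
    (pos q : Int × Int) :
    (pvA_nbrStep P d pos).getD q [] =
      if q = pos then d.getD pos [] ++ pvAdjA P pos else d.getD q [] := by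
  have aux : ∀ (os : List (Int × Int)) (d : PySem.Dict (Int × Int) (List (Int × Int)))
      (q : Int × Int),
      (os.foldl (fun d2 o =>
        if PySem.Set.contains P (pos.1 + o.1, pos.2 + o.2) then
          d2.modify pos [] (· ++ [(pos.1 + o.1, pos.2 + o.2)])
        else d2) d).getD q []
      = if q = pos then
          d.getD pos [] ++
            List.map (fun o => (pos.1 + o.1, pos.2 + o.2))
              (os.filter (fun o => PySem.Set.contains P (pos.1 + o.1, pos.2 + o.2)))
        else d.getD q [] := by
    intro os
    induction os with
    | nil => intro d q; by_cases h : q = pos <;> simp [h]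
    | cons o t ih =>
      intro d q
      simp only [List.foldl_cons]
      cases hc : PySem.Set.contains P (pos.1 + o.1, pos.2 + o.2)
      · have hc' : (pos.1 + o.1, pos.2 + o.2) ∉ P := by
          simpa [PySem.Set.contains, List.contains_iff_mem] using hc
        rw [ih]
        by_cases h : q = pos <;> simp [h, hc', List.filter_cons]
      · have hc' : (pos.1 + o.1, pos.2 + o.2) ∈ P := by
          simpa [PySem.Set.contains, List.contains_iff_mem] using hc
        rw [ih]
        by_cases h : q = pos
        · subst h
          simp [hc', List.filter_cons, PySem.Dict.getD_modify_self]
        · simp [h, hc', List.filter_cons, PySem.Dict.getD_modify]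
  exact aux pvA_offsets d q

lemma pvAdjDict_getD (P : PySem.Set (Int × Int)) (hP : P.Nodup) (p : Int × Int) :
    (pvAdjDict P).getD p [] = if p ∈ P then pvAdjA P p else [] := by
  have aux : ∀ (l : List (Int × Int)) (d : PySem.Dict (Int × Int) (List (Int × Int))),
      l.Nodup → ∀ q,
      (l.foldl (pvA_nbrStep P) d).getD q []
        = if q ∈ l then d.getD q [] ++ pvAdjA P q else d.getD q [] := by
    intro l
    induction l with
    | nil => intro d _ q; simp
    | cons x t ih =>
      intro d hnd q
      simp only [List.foldl_cons]
      rw [ih _ (List.nodup_cons.mp hnd).2]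
      by_cases hqt : q ∈ t
      · have hqx : q ≠ x := by
          rintro rfl; exact (List.nodup_cons.mp hnd).1 hqt
        simp [hqt, hqx, pvNbrStep_getD]
      · by_cases hqx : q = x
        · subst hqx
          simp [hqt, pvNbrStep_getD]
        · simp [hqt, hqx, pvNbrStep_getD]
  rw [pvAdjDict, aux P (pvD0 P) hP p]
  by_cases h : p ∈ P <;> simp [h, pvD0_getD]

-- ---- A side: BFS ----
lemma pvBfs_inner (nbrs : List (Int × Int)) (vis : PySem.Set (Int × Int)) (q : List (Int × Int)) :
    (nbrs.foldl
      (fun (st : PySem.Set (Int × Int) × List (Int × Int)) nb =>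
        if PySem.Set.contains st.1 nb then st
        else (PySem.Set.add st.1 nb, st.2 ++ [nb])) (vis, q)).1 = PySem.Set.update vis nbrs
    ∧ (∃ t, (nbrs.foldl
      (fun (st : PySem.Set (Int × Int) × List (Int × Int)) nb =>
        if PySem.Set.contains st.1 nb then st
        else (PySem.Set.add st.1 nb, st.2 ++ [nb])) (vis, q)).2 = q ++ t)
    ∧ (∀ x ∈ (nbrs.foldl
      (fun (st : PySem.Set (Int × Int) × List (Int × Int)) nb =>
        if PySem.Set.contains st.1 nb then st
        else (PySem.Set.add st.1 nb, st.2 ++ [nb])) (vis, q)).2, x ∈ q ∨ x ∈ nbrs)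
    ∧ ((nbrs.foldl
      (fun (st : PySem.Set (Int × Int) × List (Int × Int)) nb =>
        if PySem.Set.contains st.1 nb then st
        else (PySem.Set.add st.1 nb, st.2 ++ [nb])) (vis, q)).1.length + q.length
        = vis.length + (nbrs.foldl
      (fun (st : PySem.Set (Int × Int) × List (Int × Int)) nb =>
        if PySem.Set.contains st.1 nb then st
        else (PySem.Set.add st.1 nb, st.2 ++ [nb])) (vis, q)).2.length)
    ∧ (∀ x ∈ nbrs, x ∈ vis ∨ x ∈ (nbrs.foldl
      (fun (st : PySem.Set (Int × Int) × List (Int × Int)) nb =>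
        if PySem.Set.contains st.1 nb then st
        else (PySem.Set.add st.1 nb, st.2 ++ [nb])) (vis, q)).2) := by
  
  induction nbrs generalizing vis q with
  | nil =>
    exact ⟨rfl, ⟨[], (List.append_nil q).symm⟩, fun x hx => Or.inl hx, by simp,
      fun x hx => absurd hx (List.not_mem_nil)⟩
  | cons nb t ih =>
    simp only [List.foldl_cons]
    cases hc : PySem.Set.contains vis nb
    · have hnv : nb ∉ vis := by
        intro h; rw [(PySem.Set.contains_iff vis nb).mpr h] at hc; cases hc
      simp only [Bool.false_eq_true, if_false]
      obtain ⟨i1, ⟨tl, i2⟩, i3, i4, i5⟩ := ih (PySem.Set.add vis nb) (q ++ [nb])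
      have hadd : PySem.Set.add vis nb = vis ++ [nb] := PySem.Set.add_of_not_mem hnv
      refine ⟨by rw [i1, PySem.Set.update_cons], ⟨[nb] ++ tl, by rw [i2, List.append_assoc]⟩,
        ?_, ?_, ?_⟩
      · intro x hx
        rcases i3 x hx with hx' | hx'
        · rcases List.mem_append.mp hx' with h | h
          · exact Or.inl h
          · exact Or.inr (List.mem_cons.mpr (Or.inl (by simpa using h)))
        · exact Or.inr (List.mem_cons.mpr (Or.inr hx'))
      · have h4' := i4
        have hlen2 : (PySem.Set.add vis nb).length = vis.length + 1 := by rw [hadd]; simp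
        simp only [List.length_append, List.length_singleton] at h4'
        omega
      · intro x hx
        rcases List.mem_cons.mp hx with rfl | hx'
        · refine Or.inr ?_
          rw [i2]
          exact List.mem_append.mpr (Or.inl (List.mem_append.mpr (Or.inr (by simp))))
        · rcases i5 x hx' with h | h
          · rw [hadd] at h
            rcases List.mem_append.mp h with h' | h'
            · exact Or.inl h'
            · refine Or.inr ?_
              rw [i2]
              have : x = nb := by simpa using h'
              subst this
              exact List.mem_append.mpr (Or.inl (List.mem_append.mpr (Or.inr (by simp))))
          · exact Or.inr h
    · have hv : nb ∈ vis := (PySem.Set.contains_iff vis nb).mp hc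
      simp only [if_true]
      obtain ⟨i1, ⟨tl, i2⟩, i3, i4, i5⟩ := ih vis q
      refine ⟨by rw [i1, PySem.Set.update_cons, PySem.Set.add_of_mem hv], ⟨tl, i2⟩, ?_, i4, ?_⟩
      · intro x hx
        rcases i3 x hx with h | h
        · exact Or.inl h
        · exact Or.inr (List.mem_cons.mpr (Or.inr h))
      · intro x hx
        rcases List.mem_cons.mp hx with rfl | hx'
        · exact Or.inl hv
        · exact i5 x hx'

lemma pvBfs_main (P : PySem.Set (Int × Int)) (hP : P.Nodup) (s : Int × Int) :
    ∀ (fuel : Nat) (vis : PySem.Set (Int × Int)) (queue : List (Int × Int)),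
    vis.Nodup → (∀ v ∈ vis, v ∈ P) → (∀ x ∈ queue, x ∈ vis) →
    (∀ v ∈ vis, pvReach P s v) →
    (∀ v ∈ vis, v ∉ queue → ∀ nb ∈ (pvAdjDict P).getD v [], nb ∈ vis) →
    P.length - vis.length + queue.length ≤ fuel →
    (pvA_bfs (pvAdjDict P) fuel vis queue).Nodup
    ∧ (∀ v ∈ pvA_bfs (pvAdjDict P) fuel vis queue, v ∈ P)
    ∧ (∀ v ∈ pvA_bfs (pvAdjDict P) fuel vis queue, pvReach P s v)
    ∧ (∀ x ∈ vis, x ∈ pvA_bfs (pvAdjDict P) fuel vis queue)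
    ∧ (∀ v ∈ pvA_bfs (pvAdjDict P) fuel vis queue,
        ∀ nb ∈ (pvAdjDict P).getD v [], nb ∈ pvA_bfs (pvAdjDict P) fuel vis queue) := by
  
  intro fuel
  induction fuel with
  | zero =>
    intro vis queue h1 h2 h3 h4 h5 h6
    have hq : queue = [] := List.length_eq_zero_iff.mp (by omega)
    subst hq
    exact ⟨h1, h2, h4, fun x hx => hx,
      fun v hv nb hnb => h5 v hv (List.not_mem_nil) nb hnb⟩
  | succ n ihf =>
    intro vis queue h1 h2 h3 h4 h5 h6
    cases queue with
    | nil =>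
      exact ⟨h1, h2, h4, fun x hx => hx,
        fun v hv nb hnb => h5 v hv (List.not_mem_nil) nb hnb⟩
    | cons c rest =>
      have hcvis : c ∈ vis := h3 c List.mem_cons_self
      have hcP : c ∈ P := h2 c hcvis
      have hadj : (pvAdjDict P).getD c [] = pvAdjA P c := by
        rw [pvAdjDict_getD P hP, if_pos hcP]
      have hnbP : ∀ nb ∈ (pvAdjDict P).getD c [], nb ∈ P ∧ nb ∈ pvNbrs c := by
        intro nb h
        rw [hadj] at h
        exact (pvMem_pvAdjA P c nb).mp h
      obtain ⟨i1, ⟨tl, i2⟩, i3, i4, i5⟩ := pvBfs_inner ((pvAdjDict P).getD c []) vis rest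
      simp only [pvA_bfs]
      set st := (((pvAdjDict P).getD c []).foldl
        (fun (st : PySem.Set (Int × Int) × List (Int × Int)) nb =>
          if PySem.Set.contains st.1 nb then st
          else (PySem.Set.add st.1 nb, st.2 ++ [nb])) (vis, rest)) with hst
      have hn1 : st.1.Nodup := by rw [i1]; exact PySem.Set.nodup_update vis _ h1
      have hm1 : ∀ v, v ∈ st.1 ↔ v ∈ vis ∨ v ∈ (pvAdjDict P).getD c [] := by
        intro v; rw [i1]; exact PySem.Set.mem_update vis _ v
      have hsub : ∀ v ∈ st.1, v ∈ P := by
        intro v hv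
        rcases (hm1 v).mp hv with h | h
        · exact h2 v h
        · exact (hnbP v h).1
      have hq1 : ∀ x ∈ st.2, x ∈ st.1 := by
        intro x hx
        rcases i3 x hx with h | h
        · exact (hm1 x).mpr (Or.inl (h3 x (List.mem_cons.mpr (Or.inr h))))
        · exact (hm1 x).mpr (Or.inr h)
      have hr1 : ∀ v ∈ st.1, pvReach P s v := by
        intro v hv
        rcases (hm1 v).mp hv with h | h
        · exact h4 v h
        · exact Relation.ReflTransGen.tail (h4 c hcvis) ⟨hcP, (hnbP v h).1, (hnbP v h).2⟩
      have hc1 : ∀ v ∈ st.1, v ∉ st.2 → ∀ nb ∈ (pvAdjDict P).getD v [], nb ∈ st.1 := by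
        intro v hv hnv nb hnb
        by_cases hvvis : v ∈ vis
        · by_cases hvq : v ∈ (c :: rest)
          · rcases List.mem_cons.mp hvq with rfl | hvrest
            · exact (hm1 nb).mpr (Or.inr hnb)
            · exact absurd (by rw [i2]; exact List.mem_append.mpr (Or.inl hvrest)) hnv
          · exact (hm1 nb).mpr (Or.inl (h5 v hvvis hvq nb hnb))
        · have hvnb : v ∈ (pvAdjDict P).getD c [] := ((hm1 v).mp hv).resolve_left hvvis
          rcases i5 v hvnb with h | h
          · exact absurd h hvvis
          · exact absurd h hnv
      have hstlen : st.1.length ≤ P.length := pvLenLe hn1 hsub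
      have e2 : st.2.length = rest.length + tl.length := by rw [i2]; simp
      have e1 : st.1.length + rest.length = vis.length + st.2.length := i4
      have hmeas : P.length - st.1.length + st.2.length ≤ n := by
        simp only [List.length_cons] at h6
        omega
      obtain ⟨o1, o2, o3, o4, o5⟩ := ihf st.1 st.2 hn1 hsub hq1 hr1 hc1 hmeas
      exact ⟨o1, o2, o3, fun x hx => o4 x ((hm1 x).mpr (Or.inl hx)), o5⟩

lemma pvA_conn (P : PySem.Set (Int × Int)) (hP : P.Nodup) (s : Int × Int) (hs : s ∈ P) :
    ((PySem.Set.len (pvA_bfs (pvAdjDict P) P.length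
        (PySem.Set.add PySem.Set.empty s) [s]) == PySem.Set.len P) = true)
    ↔ (∀ q ∈ P, pvReach P s q) := by
  
  have hlen1 : 1 ≤ P.length := List.length_pos_of_mem hs
  have hadd : PySem.Set.add (PySem.Set.empty : PySem.Set (Int × Int)) s = [s] := rfl
  rw [hadd]
  obtain ⟨o1, o2, o3, o4, o5⟩ := pvBfs_main P hP s P.length [s] [s]
    (by simp)
    (by intro v hv; rw [List.mem_singleton] at hv; subst hv; exact hs)
    (fun x hx => hx)
    (by intro v hv; rw [List.mem_singleton] at hv; subst hv; exact Relation.ReflTransGen.refl)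
    (by
      intro v hv hnv
      exact absurd hv hnv)
    (by simp; omega)
  set out := pvA_bfs (pvAdjDict P) P.length [s] [s] with hout
  have hsout : s ∈ out := o4 s (List.mem_singleton.mpr rfl)
  have hro : ∀ q, pvReach P s q → q ∈ out := by
    intro q h
    induction h with
    | refl => exact hsout
    | tail hab e ih =>
      obtain ⟨hbP, hqP, hnb⟩ := e
      refine o5 _ ih _ ?_
      rw [pvAdjDict_getD P hP, if_pos hbP]
      exact (pvMem_pvAdjA P _ _).mpr ⟨hqP, hnb⟩
  have hb : (PySem.Set.len out == PySem.Set.len P) = true ↔ out.length = P.length := by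
    simp [PySem.Set.len]
  rw [hb]
  constructor
  · intro hlen2 q hq
    have hsubF : out.toFinset ⊆ P.toFinset := by
      intro x hx
      rw [List.mem_toFinset] at hx ⊢
      exact o2 x hx
    have hcardF : P.toFinset.card ≤ out.toFinset.card := by
      rw [List.toFinset_card_of_nodup o1, List.toFinset_card_of_nodup hP, hlen2]
    have heq := Finset.eq_of_subset_of_card_le hsubF hcardF
    have hqo : q ∈ out := by
      rw [← List.mem_toFinset, ← heq, List.mem_toFinset] at hq
      exact hq
    exact o3 q hqo
  · intro hreach
    exact le_antisymm (pvLenLe o1 o2) (pvLenLe hP (fun q hq => hro q (hreach q hq)))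

-- ---- B side: pure label model ----
def pvRelabel (l : (Int × Int) → (Int × Int)) (old nw : Int × Int) : (Int × Int) → (Int × Int) :=
  fun q => if l q = old then nw else l q

def pvStepF (P : List (Int × Int)) (l : (Int × Int) → (Int × Int)) (pos : Int × Int) :
    (Int × Int) → (Int × Int) :=
  (pvNbrs pos).foldl
    (fun l nb => if nb ∈ P ∧ l nb ≠ l pos then pvRelabel l (l nb) (l pos) else l) l

def pvLF (P : List (Int × Int)) : (Int × Int) → (Int × Int) := P.foldl (pvStepF P) id

def pvLDict (P : PySem.Set (Int × Int)) : PySem.Dict (Int × Int) (Int × Int) :=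
  P.foldl (pvB_step P) (P.foldl (fun d p => d.insert p p) PySem.Dict.empty)

def pvRep (P : List (Int × Int)) (d : PySem.Dict (Int × Int) (Int × Int))
    (l : (Int × Int) → (Int × Int)) : Prop :=
  d.items = P.map (fun q => (q, l q))

lemma pvRep_getD (P : List (Int × Int)) (hP : P.Nodup)
    (d : PySem.Dict (Int × Int) (Int × Int)) (l : (Int × Int) → (Int × Int))
    (h : pvRep P d l) {q : Int × Int} (hq : q ∈ P) (d0 : Int × Int) :
    d.getD q d0 = l q := by
  have hk : d.keys.Nodup := by
    unfold pvRep at h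
    simp only [PySem.Dict.keys, h, List.map_map]
    simpa [Function.comp_def] using hP
  have hmem : (q, l q) ∈ d.items := by
    unfold pvRep at h
    rw [h]
    exact List.mem_map_of_mem hq
  exact PySem.Dict.getD_of_mem_items d hmem hk d0

lemma pvRep_init (P : List (Int × Int)) (hP : P.Nodup) :
    pvRep P (P.foldl (fun d p => d.insert p p) PySem.Dict.empty) id := by
  have h := PySem.Dict.items_foldl_insert_fresh P (fun a => a) (fun a => a) PySem.Dict.empty
    (fun a _ => PySem.Dict.contains_empty a) (by simpa using hP)
  unfold pvRep
  simpa using h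

lemma pvOfList_items (g : (Int × Int) → (Int × Int)) (P : List (Int × Int)) (hP : P.Nodup) :
    (PySem.Dict.ofList (P.map (fun q => (q, g q)))).items = P.map (fun q => (q, g q)) := by
  have h := PySem.Dict.items_foldl_insert_fresh (P.map (fun q => (q, g q)))
    (fun p => p.1) (fun p => p.2) PySem.Dict.empty
    (fun a _ => PySem.Dict.contains_empty _) (by simpa [List.map_map, Function.comp_def] using hP)
  simpa [PySem.Dict.ofList, PySem.Dict.update] using h

lemma pvRep_step1 (P : PySem.Set (Int × Int)) (hP : P.Nodup)
    (d : PySem.Dict (Int × Int) (Int × Int)) (l : (Int × Int) → (Int × Int))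
    (h : pvRep P d l) {pos : Int × Int} (hpos : pos ∈ P) (nb : Int × Int) :
    pvRep P
      (if PySem.Set.contains P nb && !(d.getD nb nb == d.getD pos pos) then
          PySem.Dict.ofList (d.items.map (fun qv =>
            (qv.1, if qv.2 == d.getD nb nb then d.getD pos pos else qv.2)))
        else d)
      (if nb ∈ P ∧ l nb ≠ l pos then pvRelabel l (l nb) (l pos) else l) := by
  by_cases hmem : nb ∈ P
  · have hgnb : d.getD nb nb = l nb := pvRep_getD P hP d l h hmem nb
    have hgpos : d.getD pos pos = l pos := pvRep_getD P hP d l h hpos pos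
    by_cases heq : l nb = l pos
    · rw [if_neg (by rw [hgnb, hgpos]; simp [heq]), if_neg (by tauto)]
      exact h
    · rw [if_pos (by
        rw [hgnb, hgpos]
        simp only [Bool.and_eq_true, Bool.not_eq_true']
        exact ⟨(PySem.Set.contains_iff P nb).mpr hmem, by simp [heq]⟩),
        if_pos ⟨hmem, heq⟩]
      have hitems : d.items.map (fun qv =>
          (qv.1, if qv.2 == d.getD nb nb then d.getD pos pos else qv.2)) =
          P.map (fun q => (q, pvRelabel l (l nb) (l pos) q)) := by
        unfold pvRep at h
        rw [h, List.map_map]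
        refine List.map_congr_left (fun q _ => ?_)
        simp [Function.comp, hgnb, hgpos, pvRelabel, beq_iff_eq]
      unfold pvRep
      rw [hitems, pvOfList_items _ P hP]
  · have hcf : PySem.Set.contains P nb = false := by
      rw [← Bool.not_eq_true, PySem.Set.contains_iff]
      exact hmem
    rw [if_neg (by simp only [hcf, Bool.false_and]; simp), if_neg (by tauto)]
    exact h

lemma pvRep_step (P : PySem.Set (Int × Int)) (hP : P.Nodup)
    (d : PySem.Dict (Int × Int) (Int × Int)) (l : (Int × Int) → (Int × Int))
    (h : pvRep P d l) {pos : Int × Int} (hpos : pos ∈ P) :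
    pvRep P (pvB_step P d pos) (pvStepF P l pos) := by
  show pvRep P ((pvNbrs pos).foldl _ d) ((pvNbrs pos).foldl _ l)
  generalize pvNbrs pos = ns
  induction ns generalizing d l with
  | nil => exact h
  | cons nb t ih =>
    simp only [List.foldl_cons]
    exact ih _ _ (pvRep_step1 P hP d l h hpos nb)

lemma pvRep_final (P : PySem.Set (Int × Int)) (hP : P.Nodup) :
    pvRep P (pvLDict P) (pvLF P) := by
  unfold pvLDict pvLF
  have aux : ∀ (m : List (Int × Int)), (∀ x ∈ m, x ∈ P) →
      ∀ (d : PySem.Dict (Int × Int) (Int × Int)) (l : (Int × Int) → (Int × Int)),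
      pvRep P d l → pvRep P (m.foldl (pvB_step P) d) (m.foldl (pvStepF P) l) := by
    intro m
    induction m with
    | nil => intro _ d l h; exact h
    | cons x t ih =>
      intro hm d l h
      simp only [List.foldl_cons]
      exact ih (fun y hy => hm y (List.mem_cons.mpr (Or.inr hy))) _ _
        (pvRep_step P hP d l h (hm x List.mem_cons_self))
  exact aux P (fun x hx => hx) _ id (pvRep_init P hP)

-- ---- B side: soundness (equal labels are connected) ----
def pvSound (P : List (Int × Int)) (l : (Int × Int) → (Int × Int)) : Prop :=
  ∀ p q, p ∈ P → q ∈ P → l p = l q → pvReach P p q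

lemma pvSound_relabel (P : List (Int × Int)) (l : (Int × Int) → (Int × Int))
    (hl : pvSound P l) {pos nb : Int × Int} (hpos : pos ∈ P) (hnb : nb ∈ P)
    (hn : nb ∈ pvNbrs pos) : pvSound P (pvRelabel l (l nb) (l pos)) := by
  have hedge : pvReach P pos nb := Relation.ReflTransGen.single ⟨hpos, hnb, hn⟩
  intro p q hp hq heq
  unfold pvRelabel at heq
  split_ifs at heq with h1 h2 h2
  · exact Relation.ReflTransGen.trans (hl p nb hp hnb h1) (pvReach_symm P (hl q nb hq hnb h2))
  · -- l p = l nb, l q ≠ l nb, l pos = l q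
    refine Relation.ReflTransGen.trans (hl p nb hp hnb h1) ?_
    refine Relation.ReflTransGen.trans (pvReach_symm P hedge) ?_
    exact hl pos q hpos hq heq
  · -- l p ≠ l nb, l q = l nb, l p = l pos
    refine Relation.ReflTransGen.trans (hl p pos hp hpos heq) ?_
    refine Relation.ReflTransGen.trans hedge ?_
    exact hl nb q hnb hq h2.symm
  · exact hl p q hp hq heq

lemma pvSound_stepF (P : List (Int × Int)) (l : (Int × Int) → (Int × Int))
    (hl : pvSound P l) {pos : Int × Int} (hpos : pos ∈ P) :
    pvSound P (pvStepF P l pos) := by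
  unfold pvStepF
  have aux : ∀ (ns : List (Int × Int)), (∀ x ∈ ns, x ∈ pvNbrs pos) →
      ∀ (l : (Int × Int) → (Int × Int)), pvSound P l →
      pvSound P (ns.foldl
        (fun l nb => if nb ∈ P ∧ l nb ≠ l pos then pvRelabel l (l nb) (l pos) else l) l) := by
    intro ns
    induction ns with
    | nil => intro _ l hl; exact hl
    | cons nb t ih =>
      intro hns l hl
      simp only [List.foldl_cons]
      refine ih (fun x hx => hns x (List.mem_cons.mpr (Or.inr hx))) _ ?_
      by_cases hg : nb ∈ P ∧ l nb ≠ l pos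
      · rw [if_pos hg]
        exact pvSound_relabel P l hl hpos hg.1 (hns nb List.mem_cons_self)
      · rw [if_neg hg]
        exact hl
  exact aux (pvNbrs pos) (fun x hx => hx) l hl

lemma pvSound_final (P : List (Int × Int)) : pvSound P (pvLF P) := by
  unfold pvLF
  have aux : ∀ (m : List (Int × Int)), (∀ x ∈ m, x ∈ P) →
      ∀ (l : (Int × Int) → (Int × Int)), pvSound P l →
      pvSound P (m.foldl (pvStepF P) l) := by
    intro m
    induction m with
    | nil => intro _ l hl; exact hl
    | cons x t ih =>
      intro hm l hl
      simp only [List.foldl_cons]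
      exact ih (fun y hy => hm y (List.mem_cons.mpr (Or.inr hy))) _
        (pvSound_stepF P l hl (hm x List.mem_cons_self))
  refine aux P (fun x hx => hx) id ?_
  intro p q hp hq heq
  simp only [id] at heq
  subst heq
  exact Relation.ReflTransGen.refl

-- ---- B side: completeness (connected positions get equal labels) ----
lemma pvRelabel_presEq (l : (Int × Int) → (Int × Int)) (old nw a b : Int × Int)
    (h : l a = l b) : pvRelabel l old nw a = pvRelabel l old nw b := by
  unfold pvRelabel
  rw [h]

lemma pvInner_presEq (P : List (Int × Int)) (pos : Int × Int) :
    ∀ (ns : List (Int × Int)) (l : (Int × Int) → (Int × Int)) (a b : Int × Int), l a = l b →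
    (ns.foldl (fun l nb => if nb ∈ P ∧ l nb ≠ l pos then pvRelabel l (l nb) (l pos) else l) l) a
    = (ns.foldl (fun l nb => if nb ∈ P ∧ l nb ≠ l pos then pvRelabel l (l nb) (l pos) else l) l) b := by
  intro ns
  induction ns with
  | nil => intro l a b h; exact h
  | cons y u ih =>
    intro l a b h
    simp only [List.foldl_cons]
    refine ih _ a b ?_
    by_cases hg : y ∈ P ∧ l y ≠ l pos
    · rw [if_pos hg]
      exact pvRelabel_presEq l (l y) (l pos) a b h
    · rw [if_neg hg]
      exact h

lemma pvStepF_presEq (P : List (Int × Int)) (l : (Int × Int) → (Int × Int))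
    (pos a b : Int × Int) (h : l a = l b) : pvStepF P l pos a = pvStepF P l pos b := by
  unfold pvStepF
  exact pvInner_presEq P pos (pvNbrs pos) l a b h

lemma pvFold_presEq (P : List (Int × Int)) (m : List (Int × Int))
    (l : (Int × Int) → (Int × Int)) (a b : Int × Int) (h : l a = l b) :
    (m.foldl (pvStepF P) l) a = (m.foldl (pvStepF P) l) b := by
  induction m generalizing l with
  | nil => exact h
  | cons x t ih =>
    simp only [List.foldl_cons]
    exact ih _ (pvStepF_presEq P l x a b h)

lemma pvStepF_done (P : List (Int × Int)) (l : (Int × Int) → (Int × Int)) (pos : Int × Int) :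
    ∀ nb ∈ pvNbrs pos, nb ∈ P → pvStepF P l pos nb = pvStepF P l pos pos := by
  unfold pvStepF
  have aux : ∀ (ns : List (Int × Int)) (l : (Int × Int) → (Int × Int)),
      ∀ nb ∈ ns, nb ∈ P →
      (ns.foldl (fun l nb => if nb ∈ P ∧ l nb ≠ l pos then pvRelabel l (l nb) (l pos) else l) l) nb
      = (ns.foldl (fun l nb => if nb ∈ P ∧ l nb ≠ l pos then pvRelabel l (l nb) (l pos) else l) l) pos := by
    intro ns
    induction ns with
    | nil => intro l nb h; exact absurd h (List.not_mem_nil)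
    | cons nb0 t ih =>
      intro l nb hmem hnbP
      simp only [List.foldl_cons]
      rcases List.mem_cons.mp hmem with rfl | hmt
      · -- nb = nb0 : establish equality after first step, then preserve
        refine pvInner_presEq P pos t _ nb pos ?_
        by_cases hg : nb ∈ P ∧ l nb ≠ l pos
        · rw [if_pos hg]
          unfold pvRelabel
          rw [if_pos rfl, if_neg (Ne.symm hg.2)]
        · rw [if_neg hg]
          rcases Decidable.not_and_iff_not_or_not.mp hg with h' | h'
          · exact absurd hnbP h'
          · exact Decidable.not_not.mp h'
      · exact ih _ nb hmt hnbP
  exact aux (pvNbrs pos) l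

def pvDone (P : List (Int × Int)) (l : (Int × Int) → (Int × Int)) (m : List (Int × Int)) : Prop :=
  ∀ pos ∈ m, ∀ nb ∈ pvNbrs pos, nb ∈ P → l nb = l pos

lemma pvDone_fold (P : List (Int × Int)) :
    ∀ (m : List (Int × Int)) (l : (Int × Int) → (Int × Int)),
      pvDone P (m.foldl (pvStepF P) l) m := by
  intro m
  induction m with
  | nil => intro l pos h; exact absurd h (List.not_mem_nil)
  | cons x t ih =>
    intro l pos hmem nb hnb hnbP
    simp only [List.foldl_cons]
    rcases List.mem_cons.mp hmem with rfl | hmt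
    · exact pvFold_presEq P t _ nb pos (pvStepF_done P l pos nb hnb hnbP)
    · exact ih _ pos hmt nb hnb hnbP

lemma pvComplete (P : List (Int × Int)) (l : (Int × Int) → (Int × Int))
    (hd : pvDone P l P) : ∀ p q, pvReach P p q → l p = l q := by
  intro p q h
  induction h with
  | refl => rfl
  | tail hab e ih =>
    obtain ⟨hbP, hcP, hnbs⟩ := e
    rw [ih, (hd _ hbP _ hnbs hcP)]

lemma pvB_conn (P : PySem.Set (Int × Int)) (hP : P.Nodup) (s : Int × Int) (hs : s ∈ P) :
    (((pvLDict P).values.all (fun v => v == (pvLDict P).getD s s)) = true)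
    ↔ (∀ q ∈ P, pvReach P s q) := by
  have hrep := pvRep_final P hP
  have hvals : (pvLDict P).values = P.map (pvLF P) := by
    unfold pvRep at hrep
    simp only [PySem.Dict.values, hrep, List.map_map]
    exact List.map_congr_left (fun q _ => rfl)
  have hgs : (pvLDict P).getD s s = pvLF P s := pvRep_getD P hP _ _ hrep hs s
  rw [hvals, hgs]
  have hall : ((P.map (pvLF P)).all (fun v => v == pvLF P s) = true)
      ↔ ∀ q ∈ P, pvLF P q = pvLF P s := by
    simp [List.all_eq_true]
  rw [hall]
  constructor
  · intro h q hq
    exact pvSound_final P s q hs hq (h q hq).symm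
  · intro h q hq
    have hdone : pvDone P (pvLF P) P := pvDone_fold P P id
    exact (pvComplete P (pvLF P) hdone s q (h q hq)).symm

-- ---- top level glue ----
lemma pvChain4 (a b c d conn : Bool) :
    (if !a then false else if !b then false
     else if !c then false else if !d then false else conn) =
    (if a && b && c && d then conn else false) := by
  cases a <;> cases b <;> cases c <;> cases d <;> rfl

-- ===== VERDICT (by name: the statement is the Claim_ definition above) =====
theorem check_robot_configuration_spec : Claim_equal_check_robot_configuration := by
  intro configuration _
  unfold Spec_check_robot_configuration
  cases configuration with
  | nil => rfl
  | cons c0 rest =>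
    simp only [check_robot_configuration, check_robot_configuration_alt]
    rw [pvChain4, pvGuard_eq c0 rest]
    cases hB : (pvB_partOk c0 true && rest.all (fun p => pvB_partOk p false))
    · simp
    · simp only [if_true]
      have hPnd : (PySem.Set.ofList ((c0 :: rest).map
          (fun part => (part.getD 0 0, part.getD 1 0)))).Nodup := PySem.Set.nodup_ofList _
      have hs : (c0.getD 0 0, c0.getD 1 0) ∈ PySem.Set.ofList ((c0 :: rest).map
          (fun part => (part.getD 0 0, part.getD 1 0))) := by
        rw [PySem.Set.mem_ofList]
        exact List.mem_map_of_mem List.mem_cons_self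
      exact Bool.coe_iff_coe.mp
        ((pvA_conn _ hPnd _ hs).trans (pvB_conn _ hPnd _ hs).symm)
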